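-- pv_equiv track=rewrite | github.com/dongchirua/ASR_benchmark | src/refine_text.py | normalize_spine_annotation
-- ===== SOURCE A (Python) =====
-- def normalize_spine_annotation(text):
--     def is_spine_stuffs(txt):
--         txt_ = list(txt)
--         nlength = len(txt_)
--         flag = []
--         for i in range(0, nlength-1, 2):
--             if txt_[i] in set(['c', 'd', 'l', 's']) and txt_[i+1].isdigit():
--                 flag.append(1)
--             else:
--                 flag.append(0)
--         mask = [i for i in range(0, nlength, 2)]
--         if sum(flag) == len(mask):
--             return True
--         return False
--
--     new_text = []
--     for i in text.split():
--         if is_spine_stuffs(i):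
--             text_ = list(i)
--             for j in range(0, len(i), 3):
--                 text_.insert(j, ' ')
--             new_text.append(''.join(text_))
--         else:
--             new_text.append(i)
--     return ' '.join(new_text)
-- ===== SOURCE B (Python) =====
-- def normalize_spine_annotation(text):
--     def is_spine_stuffs(txt):
--         if len(txt) % 2 != 0:
--             return False
--         return all(txt[k] in 'cdls' and txt[k + 1].isdigit()
--                    for k in range(0, len(txt), 2))
--
--     return ' '.join(
--         ''.join(' ' + tok[k:k + 2] for k in range(0, len(tok), 2))
--         if is_spine_stuffs(tok) else tok
--         for tok in text.split())
-- ===== Notes on version B (the rewrite author's own statement) =====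
-- stated objective: faster
-- what changed: The flag/mask/sum validator becomes a direct even-length + all-pairs check, and the quadratic list.insert space-insertion loop becomes a linear pass that prefixes each 2-char pair with a space and concatenates.
-- intended difference: On text containing a whitespace-separated spine token of even length at least 6 (each pair a cdls-letter plus digit), A's step-3 insert loop runs out of insertion points and leaves the trailing pairs glued together, while B prefixes every pair with a space, which is the intended normalization. — e.g. on normalize_spine_annotation("c1d2l3"): A returns " c1 d2l3", B returns " c1 d2 l3"
import Mathlib
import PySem

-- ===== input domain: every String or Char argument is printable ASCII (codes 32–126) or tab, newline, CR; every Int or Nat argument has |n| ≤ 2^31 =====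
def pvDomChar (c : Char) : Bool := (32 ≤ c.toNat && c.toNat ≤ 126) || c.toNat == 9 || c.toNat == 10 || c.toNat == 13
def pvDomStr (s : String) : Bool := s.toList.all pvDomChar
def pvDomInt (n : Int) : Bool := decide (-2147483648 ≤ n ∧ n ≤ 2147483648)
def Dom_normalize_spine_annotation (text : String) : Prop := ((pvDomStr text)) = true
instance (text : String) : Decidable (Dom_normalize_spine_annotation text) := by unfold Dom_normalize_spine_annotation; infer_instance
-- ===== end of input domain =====

-- B replaces A's flag/mask/sum validator by a direct even-length + all-pairs check and A's
-- quadratic list.insert spacing loop by a linear pass that prefixes each 2-char pair with a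
-- space (measured faster); on spine tokens of length ≥ 6 A's step-3 insert loop leaves
-- trailing pairs unseparated and B spaces every pair (the intended value); see D_ below.

-- ===== PORT A =====
-- inner helper is_spine_stuffs; both reads txt_[i] and txt_[i+1] have i + 1 ≤ nlength - 1,
-- always in range, so pyGetD with a dummy default is exact here
def pvIsSpineStuffsA (txt : List Char) : Bool :=
  let txt_ := txt
  let nlength : Int := PySem.List.len txt_
  let flag : List Int :=
    (PySem.List.pyRange 0 (nlength - 1) 2).foldl (fun acc i =>
      if PySem.Set.contains (PySem.Set.ofList ['c', 'd', 'l', 's']) (PySem.List.pyGetD txt_ i ' ')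
          && PySem.Chars.isdigit (PySem.List.pyGetD txt_ (i + 1) ' ') then
        acc ++ [(1 : Int)]
      else
        acc ++ [(0 : Int)]) []
  let mask : List Int := PySem.List.pyRange 0 nlength 2
  if flag.sum = PySem.List.len mask then true else false

def normalize_spine_annotation (text : String) : String :=
  let new_text : List (List Char) :=
    (PySem.Chars.split₀ text.toList).foldl (fun acc i =>
      if pvIsSpineStuffsA i then
        let text_ : List Char :=
          (PySem.List.pyRange 0 (PySem.List.len i) 3).foldl
            (fun st j => PySem.List.insert st j ' ') i
        acc ++ [text_]
      else
        acc ++ [i]) []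
  String.ofList (PySem.Chars.join [' '] new_text)

-- ===== PORT B =====
-- B's validator: even length, and every pair is a 'cdls' letter followed by a digit
def pvIsSpineStuffsB (txt : List Char) : Bool :=
  if PySem.Int.mod (PySem.List.len txt) 2 ≠ 0 then false
  else
    (PySem.List.pyRange 0 (PySem.List.len txt) 2).all (fun k =>
      PySem.Chars.isIn [PySem.List.pyGetD txt k ' '] ['c', 'd', 'l', 's']
        && PySem.Chars.isdigit (PySem.List.pyGetD txt (k + 1) ' '))

def normalize_spine_annotation_alt (text : String) : String :=
  String.ofList (PySem.Chars.join [' ']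
    ((PySem.Chars.split₀ text.toList).map (fun tok =>
      if pvIsSpineStuffsB tok then
        ((PySem.List.pyRange 0 (PySem.List.len tok) 2).map
          (fun k => ' ' :: PySem.List.slice tok (some k) (some (k + 2)))).flatten
      else tok)))

-- ===== PRECONDITION & SPEC =====
-- On inputs containing a whitespace-separated spine token of even length ≥ 6 (each pair a
-- 'cdls' letter followed by a digit), A's step-3 insert loop runs out of insertion points and
-- returns the token with its trailing pairs still glued together, while B prefixes every
-- pair with a space, which is the intended normalization.
-- linear-time check that a token consists entirely of (cdls-letter, digit) pairs
def pvPairs : List Char → Bool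
  | [] => true
  | [_] => false
  | a :: b :: rest =>
    (['c', 'd', 'l', 's'].contains a && PySem.Chars.isdigit b) && pvPairs rest

def D_normalize_spine_annotation (text : String) : Prop :=
  ∃ tok ∈ PySem.Chars.split₀ text.toList, 6 ≤ tok.length ∧ pvPairs tok = true
instance (text : String) : Decidable (D_normalize_spine_annotation text) := by
  unfold D_normalize_spine_annotation; infer_instance

def Spec_normalize_spine_annotation (text : String) (out : String) : Prop :=
  ¬ D_normalize_spine_annotation text → out = normalize_spine_annotation_alt text
instance (text : String) (out : String) : Decidable (Spec_normalize_spine_annotation text out) := by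
  unfold Spec_normalize_spine_annotation; infer_instance

def pvDiffWitness_normalize_spine_annotation : String := "c1d2l3"
def pvDiffWitnessOut_normalize_spine_annotation : String × String := (" c1 d2l3", " c1 d2 l3")

-- ===== CLAIM (what is proved, stated in full; the proofs are below) =====
def Claim_unchanged_normalize_spine_annotation : Prop := ∀ (text : String), Dom_normalize_spine_annotation text → Spec_normalize_spine_annotation text (normalize_spine_annotation text)
def Claim_changed_normalize_spine_annotation : Prop := Dom_normalize_spine_annotation (pvDiffWitness_normalize_spine_annotation) ∧ D_normalize_spine_annotation (pvDiffWitness_normalize_spine_annotation) ∧ normalize_spine_annotation (pvDiffWitness_normalize_spine_annotation) = pvDiffWitnessOut_normalize_spine_annotation.1 ∧ normalize_spine_annotation_alt (pvDiffWitness_normalize_spine_annotation) = pvDiffWitnessOut_normalize_spine_annotation.2 ∧ pvDiffWitnessOut_normalize_spine_annotation.1 ≠ pvDiffWitnessOut_normalize_spine_annotation.2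
def Claim_exact_normalize_spine_annotation : Prop := ∀ (text : String), Dom_normalize_spine_annotation text → D_normalize_spine_annotation text → normalize_spine_annotation text ≠ normalize_spine_annotation_alt text

-- ===== LEMMAS AND PROOFS =====

-- the condition A and B both test on pair k of a token, as a proposition
def pvPairOk (tok : List Char) (k : Nat) : Prop :=
  tok.getD (2 * k) ' ' ∈ ['c', 'd', 'l', 's'] ∧
    PySem.Chars.isdigit (tok.getD (2 * k + 1) ' ') = true

-- what both validators decide: even length, every pair valid
def pvOk (tok : List Char) : Prop :=
  tok.length % 2 = 0 ∧ ∀ k < tok.length / 2, pvPairOk tok k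

lemma pvPairOk_shift (a b : Char) (rest : List Char) (k : Nat) :
    pvPairOk (a :: b :: rest) (k + 1) ↔ pvPairOk rest k := by
  unfold pvPairOk
  have e1 : 2 * (k + 1) = (2 * k) + 1 + 1 := by omega
  have e2 : 2 * (k + 1) + 1 = (2 * k + 1) + 1 + 1 := by omega
  rw [e2, e1, List.getD_cons_succ, List.getD_cons_succ, List.getD_cons_succ, List.getD_cons_succ]

lemma pvPairs_iff (tok : List Char) :
    pvPairs tok = true ↔ (tok.length % 2 = 0 ∧ ∀ k < tok.length / 2, pvPairOk tok k) := by
  induction tok using pvPairs.induct with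
  | case1 => simp [pvPairs]
  | case2 x => simp [pvPairs]
  | case3 a b rest ih =>
    simp only [pvPairs, Bool.and_eq_true, ih]
    have hlen : (a :: b :: rest).length = rest.length + 2 := by simp
    constructor
    · rintro ⟨⟨ha, hb⟩, heven, hall⟩
      refine ⟨by omega, fun k hk => ?_⟩
      cases k with
      | zero =>
        refine ⟨?_, ?_⟩ <;> simp_all [pvPairOk]
      | succ k =>
        refine (pvPairOk_shift a b rest k).mpr (hall k ?_)
        rw [hlen] at hk; omega
    · rintro ⟨heven, hall⟩
      have h0 := hall 0 (by rw [hlen]; omega)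
      refine ⟨⟨?_, ?_⟩, by omega, fun k hk => ?_⟩
      · simpa [pvPairOk] using h0.1
      · simpa [pvPairOk] using h0.2
      · refine (pvPairOk_shift a b rest k).mp (hall (k + 1) ?_)
        rw [hlen]; omega

-- A's per-index flag condition as a function
def pvCond (tok : List Char) (i : Int) : Bool :=
  PySem.Set.contains (PySem.Set.ofList ['c', 'd', 'l', 's']) (PySem.List.pyGetD tok i ' ')
    && PySem.Chars.isdigit (PySem.List.pyGetD tok (i + 1) ' ')

lemma pvIteTF (p : Prop) [Decidable p] : ((if p then true else false) = true) ↔ p := by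
  split_ifs with h <;> simp [h]

-- for even n both index ranges A and B use enumerate exactly the pair starts 0,2,…,n-2
lemma pvRange_even (n : Nat) (h : n % 2 = 0) :
    PySem.List.pyRange 0 (n : Int) 2 = (List.range (n / 2)).map (fun k : Nat => 2 * (k : Int)) ∧
    PySem.List.pyRange 0 ((n : Int) - 1) 2 = (List.range (n / 2)).map (fun k : Nat => 2 * (k : Int)) := by
  rw [PySem.List.pyRange_of_pos 0 (n : Int) (by norm_num),
      PySem.List.pyRange_of_pos 0 ((n : Int) - 1) (by norm_num)]
  have h1 : (if (0:Int) < (n : Int) then (((n:Int) - 0 + 2 - 1) / 2).toNat else 0) = n / 2 := by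
    split_ifs with hlt <;> omega
  have h2 : (if (0:Int) < (n : Int) - 1 then (((n:Int) - 1 - 0 + 2 - 1) / 2).toNat else 0) = n / 2 := by
    split_ifs with hlt <;> omega
  rw [h1, h2]
  constructor <;> · apply List.map_congr_left; intro k _; ring

lemma pvCond_nat (tok : List Char) (k : Nat) :
    pvCond tok (2 * (k : Int)) = true ↔ pvPairOk tok k := by
  have h1 : (2 * (k : Int)) = ((2 * k : Nat) : Int) := by push_cast; ring
  have h2 : ((2 * k : Nat) : Int) + 1 = ((2 * k + 1 : Nat) : Int) := by push_cast; ring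
  rw [pvCond, h1, h2, PySem.List.pyGetD_natCast, PySem.List.pyGetD_natCast]
  simp [pvPairOk, PySem.Set.contains, PySem.Set.ofList]

lemma pvA_iff (tok : List Char) : pvIsSpineStuffsA tok = true ↔ pvOk tok := by
  simp only [pvIsSpineStuffsA]
  rw [PySem.List.foldl_congr_mem _ _
      (fun (acc : List Int) (i : Int) => acc ++ [if pvCond tok i then (1:Int) else 0]) _
      (by intro acc i _; simp only [pvCond]; split_ifs <;> rfl)]
  rw [PySem.List.foldl_append_singleton_eq_map (fun i => if pvCond tok i then (1:Int) else 0)]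
  rw [List.nil_append, PySem.List.sum_map_ite_one_zero]
  rw [pvIteTF]
  rcases Nat.even_or_odd tok.length with he | ho
  · have h0 : tok.length % 2 = 0 := Nat.even_iff.mp he
    obtain ⟨hr1, hr2⟩ := pvRange_even tok.length h0
    simp only [PySem.List.len, hr1, hr2, List.countP_map, List.length_map]
    have hiff : List.countP (pvCond tok ∘ fun k : Nat => 2 * (k : Int)) (List.range (tok.length / 2))
        = (List.range (tok.length / 2)).length ↔ ∀ k < tok.length / 2, pvPairOk tok k := by
      rw [List.countP_eq_length]
      constructor
      · intro hall k hk
        exact (pvCond_nat tok k).mp (hall k (List.mem_range.mpr hk))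
      · intro hall k hk
        exact (pvCond_nat tok k).mpr (hall k (List.mem_range.mp hk))
    constructor
    · intro h
      exact ⟨h0, hiff.mp (by exact_mod_cast h)⟩
    · intro ⟨_, hall⟩
      exact_mod_cast congrArg (Nat.cast (R := Int)) (hiff.mpr hall)
  · have h1 : tok.length % 2 = 1 := Nat.odd_iff.mp ho
    have hlen1 : (PySem.List.pyRange 0 ((tok.length : Int) - 1) 2).length = (tok.length - 1) / 2 := by
      rw [PySem.List.pyRange_of_pos _ _ (by norm_num)]
      simp only [List.length_map, List.length_range]
      split_ifs <;> omega
    have hlen2 : (PySem.List.pyRange 0 (tok.length : Int) 2).length = (tok.length + 1) / 2 := by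
      rw [PySem.List.pyRange_of_pos _ _ (by norm_num)]
      simp only [List.length_map, List.length_range]
      split_ifs <;> omega
    have hle := List.countP_le_length (p := pvCond tok) (l := PySem.List.pyRange 0 ((tok.length : Int) - 1) 2)
    rw [hlen1] at hle
    simp only [PySem.List.len, hlen2]
    constructor
    · intro h
      have : List.countP (pvCond tok) (PySem.List.pyRange 0 ((tok.length : Int) - 1) 2)
          = (tok.length + 1) / 2 := by exact_mod_cast h
      omega
    · intro ⟨h0, _⟩; omega

lemma pvCondB_nat (tok : List Char) (k : Nat) :
    (PySem.Chars.isIn [PySem.List.pyGetD tok (2 * (k : Int)) ' '] ['c', 'd', 'l', 's']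
      && PySem.Chars.isdigit (PySem.List.pyGetD tok (2 * (k : Int) + 1) ' ')) = true ↔ pvPairOk tok k := by
  have h1 : (2 * (k : Int)) = ((2 * k : Nat) : Int) := by push_cast; ring
  have h2 : ((2 * k : Nat) : Int) + 1 = ((2 * k + 1 : Nat) : Int) := by push_cast; ring
  rw [h1, h2, PySem.List.pyGetD_natCast, PySem.List.pyGetD_natCast]
  simp [pvPairOk, PySem.Chars.isIn_iff_infix, List.singleton_infix_iff]

lemma pvB_iff (tok : List Char) : pvIsSpineStuffsB tok = true ↔ pvOk tok := by
  simp only [pvIsSpineStuffsB, PySem.List.len]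
  have hmod : PySem.Int.mod (tok.length : Int) 2 = ((tok.length % 2 : Nat) : Int) :=
    PySem.Int.mod_natCast tok.length 2
  rw [hmod]
  by_cases h0 : tok.length % 2 = 0
  · rw [if_neg (by simp [h0])]
    obtain ⟨hr1, _⟩ := pvRange_even tok.length h0
    rw [hr1, List.all_map, List.all_eq_true]
    constructor
    · intro hall
      exact ⟨h0, fun k hk => (pvCondB_nat tok k).mp (hall k (List.mem_range.mpr hk))⟩
    · intro ⟨_, hall⟩ k hk
      exact (pvCondB_nat tok k).mpr (hall k (List.mem_range.mp hk))
  · rw [if_pos (show ((tok.length % 2 : Nat) : Int) ≠ 0 by exact_mod_cast h0)]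
    simp [pvOk, h0]

lemma pvGo_ne_nil (s : List Char) : ∀ (cur : List Char) (acc : List (List Char)),
    (∀ t ∈ acc, t ≠ []) → ∀ t ∈ PySem.Chars.split₀.go s cur acc, t ≠ [] := by
  induction s with
  | nil =>
    intro cur acc hacc t ht
    rw [PySem.Chars.split₀.go] at ht
    split at ht
    · exact hacc t (List.mem_reverse.mp ht)
    · rename_i hcur
      rcases List.mem_cons.mp (List.mem_reverse.mp ht) with h | h
      · subst h; simpa [List.isEmpty_iff] using hcur
      · exact hacc t h
  | cons c rest ih =>
    intro cur acc hacc t ht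
    rw [PySem.Chars.split₀.go] at ht
    split at ht
    · split at ht
      · exact ih [] acc hacc t ht
      · rename_i hcur
        refine ih [] (cur.reverse :: acc) ?_ t ht
        intro u hu
        rcases List.mem_cons.mp hu with h | h
        · subst h; simpa [List.isEmpty_iff] using hcur
        · exact hacc u h
    · exact ih (c :: cur) acc hacc t ht

lemma pvSplit_ne_nil (s : List Char) : ∀ t ∈ PySem.Chars.split₀ s, t ≠ [] :=
  pvGo_ne_nil s [] [] (by simp)

-- the two per-token transformations, as named functions
def pvTransA (tok : List Char) : List Char :=
  if pvIsSpineStuffsA tok then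
    (PySem.List.pyRange 0 (PySem.List.len tok) 3).foldl
      (fun st j => PySem.List.insert st j ' ') tok
  else tok

def pvTransB (tok : List Char) : List Char :=
  if pvIsSpineStuffsB tok then
    ((PySem.List.pyRange 0 (PySem.List.len tok) 2).map
      (fun k => ' ' :: PySem.List.slice tok (some k) (some (k + 2)))).flatten
  else tok

lemma pvA_eq (text : String) :
    normalize_spine_annotation text =
      String.ofList (PySem.Chars.join [' ']
        ((PySem.Chars.split₀ text.toList).map pvTransA)) := by
  simp only [normalize_spine_annotation]
  rw [PySem.List.foldl_congr_mem _ _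
      (fun (acc : List (List Char)) (i : List Char) => acc ++ [pvTransA i]) _
      (by intro acc i _; simp only [pvTransA]; by_cases h : pvIsSpineStuffsA i <;> simp [h])]
  rw [PySem.List.foldl_append_singleton_eq_map, List.nil_append]

lemma pvB_eq (text : String) :
    normalize_spine_annotation_alt text =
      String.ofList (PySem.Chars.join [' ']
        ((PySem.Chars.split₀ text.toList).map pvTransB)) := rfl

-- outside the change region, A's insert loop and B's space-prefixed pairs produce the same token
lemma pvTok_eq (tok : List Char) (hne : tok ≠ [])
    (hnb : ¬ (6 ≤ tok.length ∧ tok.length % 2 = 0 ∧ ∀ k < tok.length / 2, pvPairOk tok k)) :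
    pvTransA tok = pvTransB tok := by
  rw [pvTransA, pvTransB]
  by_cases hok : pvOk tok
  · rw [if_pos ((pvA_iff tok).mpr hok), if_pos ((pvB_iff tok).mpr hok)]
    have hlt : tok.length < 6 := by
      by_contra h
      exact hnb ⟨by omega, hok.1, hok.2⟩
    have hpos : tok.length ≠ 0 := by simpa [List.length_eq_zero_iff] using hne
    have heven := hok.1
    have h24 : tok.length = 2 ∨ tok.length = 4 := by omega
    rcases h24 with h2 | h4
    · obtain ⟨a, b, rfl⟩ : ∃ a b, tok = [a, b] := by
        match tok, h2 with
        | [a, b], _ => exact ⟨a, b, rfl⟩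
      simp [PySem.List.len, PySem.List.pyRange, PySem.List.insert, PySem.List.slice,
        PySem.List.sliceIndices, PySem.List.clampIdx, List.range_succ]
    · obtain ⟨a, b, c, d, rfl⟩ : ∃ a b c d, tok = [a, b, c, d] := by
        match tok, h4 with
        | [a, b, c, d], _ => exact ⟨a, b, c, d, rfl⟩
      simp [PySem.List.len, PySem.List.pyRange, PySem.List.insert, PySem.List.slice,
        PySem.List.sliceIndices, PySem.List.clampIdx, List.range_succ]
  · rw [if_neg (fun h => hok ((pvA_iff tok).mp h)),
        if_neg (fun h => hok ((pvB_iff tok).mp h))]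

-- length bookkeeping for the tightness theorem
lemma pvJoinLen (p : List Char) (ps : List (List Char)) :
    (PySem.Chars.join [' '] (p :: ps)).length + 1 =
      ((p :: ps).map (fun q => q.length + 1)).sum := by
  induction ps generalizing p with
  | nil => simp [PySem.Chars.join_singleton]
  | cons q qs ih =>
    rw [PySem.Chars.join_cons_cons, List.length_append, List.length_append]
    have := ih q
    simp only [List.map_cons, List.sum_cons, List.length_singleton] at this ⊢
    omega

lemma pvJoinLen' (ps : List (List Char)) (h : ps ≠ []) :
    (PySem.Chars.join [' '] ps).length + 1 = (ps.map (fun q => q.length + 1)).sum := by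
  cases ps with
  | nil => exact absurd rfl h
  | cons p ps => exact pvJoinLen p ps

lemma pvFoldInsertLen (js : List Int) (xs : List Char) :
    (js.foldl (fun st j => PySem.List.insert st j ' ') xs).length = xs.length + js.length := by
  induction js generalizing xs with
  | nil => rfl
  | cons j js ih =>
    rw [List.foldl_cons, ih, PySem.List.length_insert, List.length_cons]
    omega

lemma pvTransA_len (tok : List Char) (hok : pvOk tok) (hne : tok ≠ []) :
    (pvTransA tok).length = tok.length + (tok.length + 2) / 3 := by
  rw [pvTransA, if_pos ((pvA_iff tok).mpr hok), pvFoldInsertLen]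
  have hpos : tok.length ≠ 0 := by simpa [List.length_eq_zero_iff] using hne
  rw [PySem.List.len, PySem.List.pyRange_of_pos _ _ (by norm_num : (0:Int) < 3)]
  simp only [List.length_map, List.length_range]
  split_ifs <;> omega

lemma pvTransB_len (tok : List Char) (hok : pvOk tok) (_hne : tok ≠ []) :
    (pvTransB tok).length = 3 * (tok.length / 2) := by
  rw [pvTransB, if_pos ((pvB_iff tok).mpr hok), PySem.List.len]
  obtain ⟨hr1, -⟩ := pvRange_even tok.length hok.1
  rw [hr1, List.map_map, List.length_flatten, List.map_map]
  rw [List.map_congr_left (g := fun _ : Nat => 3) ?_]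
  · simp [List.map_const', List.sum_replicate, smul_eq_mul, Nat.mul_comm]
  · intro j hj
    have hjlt : j < tok.length / 2 := List.mem_range.mp hj
    have e1 : (2 * (j : Int)) = ((2 * j : Nat) : Int) := by push_cast; ring
    have e2 : (2 * (j : Int) + 2) = ((2 * j : Nat) : Int) + ((2 : Nat) : Int) := by push_cast; ring
    simp only [Function.comp_apply, List.length_cons]
    rw [e2, e1, PySem.List.slice_natCast_add]
    simp only [List.length_take, List.length_drop]
    have := hok.1
    omega

lemma pvTransAB_le (tok : List Char) (hne : tok ≠ []) :
    (pvTransA tok).length + 1 ≤ (pvTransB tok).length + 1 := by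
  by_cases hok : pvOk tok
  · rw [pvTransA_len tok hok hne, pvTransB_len tok hok hne]
    have hpos : tok.length ≠ 0 := by simpa [List.length_eq_zero_iff] using hne
    have := hok.1
    omega
  · rw [pvTransA, pvTransB, if_neg (fun h => hok ((pvA_iff tok).mp h)),
        if_neg (fun h => hok ((pvB_iff tok).mp h))]

-- ===== VERDICT (by name: the statement is the Claim_ definition above) =====
theorem normalize_spine_annotation_spec : Claim_unchanged_normalize_spine_annotation := by
  intro text _ hnd
  rw [pvA_eq, pvB_eq]
  refine congrArg String.ofList (congrArg (PySem.Chars.join [' ']) ?_)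
  apply List.map_congr_left
  intro tok htok
  apply pvTok_eq tok (pvSplit_ne_nil _ tok htok)
  intro hbad
  exact hnd ⟨tok, htok, hbad.1, (pvPairs_iff tok).mpr ⟨hbad.2.1, hbad.2.2⟩⟩

theorem normalize_spine_annotation_changed : Claim_changed_normalize_spine_annotation := by
  unfold Claim_changed_normalize_spine_annotation; decide

theorem normalize_spine_annotation_tight : Claim_exact_normalize_spine_annotation := by
  intro text _ hd heq
  obtain ⟨tok, htok, hlen, hpairs⟩ := hd
  have hok : pvOk tok := by
    obtain ⟨he, hall⟩ := (pvPairs_iff tok).mp hpairs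
    exact ⟨he, hall⟩
  have hne : tok ≠ [] := pvSplit_ne_nil _ tok htok
  rw [pvA_eq, pvB_eq] at heq
  have hlists := congrArg String.toList heq
  rw [String.toList_ofList, String.toList_ofList] at hlists
  have hlensum := congrArg List.length hlists
  have htoksne : (PySem.Chars.split₀ text.toList).map pvTransA ≠ [] := by
    intro h
    rw [List.map_eq_nil_iff] at h
    rw [h] at htok
    exact absurd htok (List.not_mem_nil)
  have htoksne' : (PySem.Chars.split₀ text.toList).map pvTransB ≠ [] := by
    intro h
    rw [List.map_eq_nil_iff] at h
    rw [h] at htok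
    exact absurd htok (List.not_mem_nil)
  have hA := pvJoinLen' _ htoksne
  have hB := pvJoinLen' _ htoksne'
  have hsums : (((PySem.Chars.split₀ text.toList).map pvTransA).map (fun q => q.length + 1)).sum
      = (((PySem.Chars.split₀ text.toList).map pvTransB).map (fun q => q.length + 1)).sum := by
    omega
  rw [List.map_map, List.map_map] at hsums
  have hlt : (((PySem.Chars.split₀ text.toList)).map
        ((fun q : List Char => q.length + 1) ∘ pvTransA)).sum
      < (((PySem.Chars.split₀ text.toList)).map
        ((fun q : List Char => q.length + 1) ∘ pvTransB)).sum := by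
    apply List.sum_lt_sum
    · intro t ht
      exact pvTransAB_le t (pvSplit_ne_nil _ t ht)
    · refine ⟨tok, htok, ?_⟩
      simp only [Function.comp_apply]
      rw [pvTransA_len tok hok hne, pvTransB_len tok hok hne]
      have := hok.1
      omega
  omega
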